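-- pv_equiv track=rewrite | github.com/1358snowywolf/6_100A | ps5/testinCode.py | getRidOfPunctuation
-- ===== SOURCE A (Python) =====
-- import string
--
-- def getRidOfPunctuation(text):
--     text = text.lower()
--
--     for i in range (len(string.punctuation)):
--         text = text.replace(string.punctuation[i], ' ')
--
--     for i in range (len(text)):
--         j = i
--         removed = False
--
--         while(j < len(text) and text[j] == ' '):
--             removed = True
--             j += 1
--
--         if(removed):
--             text = text[0:i] + " " + text[j:]
--
--     return text
-- ===== SOURCE B (Python) =====
-- import string
--
-- def getRidOfPunctuation(text):
--     punct = set(string.punctuation)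
--     out = []
--     for ch in text.lower():
--         c = ' ' if ch in punct else ch
--         if not (c == ' ' and out and out[-1] == ' '):
--             out.append(c)
--     return ''.join(out)
-- ===== Notes on version B (the rewrite author's own statement) =====
-- stated objective: alternative
-- what changed: B replaces A's 32 sequential str.replace passes plus an index-and-slice space-collapsing loop with a single left-to-right pass that maps punctuation to spaces and skips a space whenever the output already ends in one.
import Mathlib
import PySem

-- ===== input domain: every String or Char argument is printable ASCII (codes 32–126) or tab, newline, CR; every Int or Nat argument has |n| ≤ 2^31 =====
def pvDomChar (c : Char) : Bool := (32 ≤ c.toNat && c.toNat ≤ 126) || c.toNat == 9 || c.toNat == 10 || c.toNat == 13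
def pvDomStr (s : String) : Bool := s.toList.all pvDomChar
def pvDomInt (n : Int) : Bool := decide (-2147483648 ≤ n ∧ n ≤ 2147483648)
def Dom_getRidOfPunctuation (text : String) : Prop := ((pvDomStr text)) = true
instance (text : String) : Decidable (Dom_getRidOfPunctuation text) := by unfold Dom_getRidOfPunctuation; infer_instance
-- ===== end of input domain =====

-- B fuses A's 32 replace passes and its slice-based space-collapsing loop
-- into one left-to-right pass (objective: alternative single-pass algorithm).

-- ===== PORT A =====
-- string.punctuation
def pvPunct : List Char := "!\"#$%&'()*+,-./:;<=>?@[\\]^_`{|}~".toList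

-- the inner while loop: j starts at i, advances while j < len(text) and text[j] == ' '
def pvScan (cs : List Char) (j : Nat) : Nat :=
  if h : j < cs.length ∧ PySem.List.pyGet? cs (j : Int) = some ' ' then pvScan cs (j + 1) else j
termination_by cs.length - j
decreasing_by omega

-- one iteration of the outer for loop: removed = (the while ran) = i < j
def pvStepA (cs : List Char) (i : Nat) : List Char :=
  let j := pvScan cs i
  if i < j then
    PySem.List.slice cs (some 0) (some (i : Int)) ++ [' '] ++ PySem.List.slice cs (some (j : Int)) none
  else cs

def getRidOfPunctuation (text : String) : String :=
  let t0 := PySem.Chars.lower text.toList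
  -- for i in range(len(string.punctuation)): text = text.replace(string.punctuation[i], ' ')
  let t1 := pvPunct.foldl (fun t p => PySem.Chars.replace t [p] [' ']) t0
  -- for i in range(len(text)): …  (len(text) read once, after the replacements)
  String.ofList ((List.range t1.length).foldl pvStepA t1)

-- ===== PORT B =====
-- one step of B's single pass: c = ' ' if ch in punct else ch; append unless out ends in ' ' and c is ' '
-- (Python's `out and out[-1] == ' '` is exactly `out.getLast? = some ' '`)
def pvStepB (acc : List Char) (ch : Char) : List Char :=
  let c := if pvPunct.contains ch then ' ' else ch
  if c = ' ' ∧ acc.getLast? = some ' ' then acc else acc ++ [c]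

def getRidOfPunctuation_alt (text : String) : String :=
  String.ofList ((PySem.Chars.lower text.toList).foldl pvStepB [])

-- ===== PRECONDITION & SPEC =====
def Spec_getRidOfPunctuation (text : String) (out : String) : Prop := out = getRidOfPunctuation_alt text
instance (text : String) (out : String) : Decidable (Spec_getRidOfPunctuation text out) := by unfold Spec_getRidOfPunctuation; infer_instance

-- ===== CLAIM (what is proved, stated in full; the proofs are below) =====
def Claim_equal_getRidOfPunctuation : Prop := ∀ (text : String), Dom_getRidOfPunctuation text → Spec_getRidOfPunctuation text (getRidOfPunctuation text)

-- ===== LEMMAS AND PROOFS =====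

-- the per-character effect of all 32 replacements
def pvRepl (c : Char) : Char := if pvPunct.contains c then ' ' else c

-- canonical "collapse runs of spaces"
def pvSqueeze : List Char → List Char
  | [] => []
  | c :: r => if c = ' ' then ' ' :: pvSqueeze (r.dropWhile (· = ' ')) else c :: pvSqueeze r
termination_by l => l.length
decreasing_by
  · have := List.length_dropWhile_le (· = ' ') r; simp; omega
  · simp

-- B's step on an already-replaced character
def pvStep2 (acc : List Char) (c : Char) : List Char :=
  if c = ' ' ∧ acc.getLast? = some ' ' then acc else acc ++ [c]

-- collapse with a "previous output char is a space" flag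
def pvCol : Bool → List Char → List Char
  | _, [] => []
  | b, c :: r => if c = ' ' then (if b then pvCol true r else ' ' :: pvCol true r) else c :: pvCol false r

-- single-character str.replace is a map
theorem pvReplaceGo_single (p : Char) :
    ∀ (l acc : List Char),
      PySem.Chars.replace.go [p] [' '] l.length l acc
        = acc.reverse ++ l.map (fun c => if c = p then ' ' else c) := by
  intro l
  induction l with
  | nil => intro acc; simp [PySem.Chars.replace.go]
  | cons c t ih =>
      intro acc
      show PySem.Chars.replace.go [p] [' '] (t.length + 1) (c :: t) acc = _
      rw [PySem.Chars.replace.go]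
      by_cases hc : c = p
      · subst hc
        simp only [List.isPrefixOf, BEq.rfl, Bool.true_and, if_true, List.length_cons,
          List.drop_succ_cons, List.length_nil, List.drop_zero]
        rw [ih]
        simp
      · have : ([p].isPrefixOf (c :: t)) = false := by
          simp [List.isPrefixOf]; intro h; exact absurd h.symm hc
        simp only [this, Bool.false_eq_true, if_false]
        rw [ih]
        simp [hc]

theorem pvReplace_single (p : Char) (l : List Char) :
    PySem.Chars.replace l [p] [' '] = l.map (fun c => if c = p then ' ' else c) := by
  rw [PySem.Chars.replace]
  simp only [List.isEmpty_cons, Bool.false_eq_true, if_false]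
  simpa using pvReplaceGo_single p l []

-- the 32 sequential replace passes are one simultaneous map (no pass introduces a char a later pass hits)
theorem pvFoldReplace (ps : List Char) (hp : ' ' ∉ ps) :
    ∀ cs : List Char,
      ps.foldl (fun t p => PySem.Chars.replace t [p] [' ']) cs
        = cs.map (fun c => if ps.contains c then ' ' else c) := by
  induction ps with
  | nil => intro cs; simp
  | cons p ps ih =>
      intro cs
      have hp' : ' ' ∉ ps := fun h => hp (List.mem_cons_of_mem _ h)
      have hpp : p ≠ ' ' := fun h => hp (h ▸ List.mem_cons_self)
      simp only [List.foldl_cons]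
      rw [pvReplace_single, ih hp', List.map_map]
      apply List.map_congr_left
      intro x _
      by_cases hx : x = p
      · subst hx
        simp
      · simp [hx]

-- pvScan from the seam of pre ++ rest counts rest's leading spaces
theorem pvScan_append : ∀ (rest pre : List Char),
    pvScan (pre ++ rest) pre.length = pre.length + (rest.takeWhile (· = ' ')).length := by
  intro rest
  induction rest with
  | nil =>
      intro pre
      rw [pvScan]
      simp
  | cons c r ih =>
      intro pre
      rw [pvScan]
      by_cases hc : c = ' '
      · subst hc
        rw [dif_pos ⟨by simp, PySem.List.pyGet?_append_length pre r ' '⟩]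
        have h1 : pre.length + 1 = (pre ++ [' ']).length := by simp
        have h2 : pre ++ ' ' :: r = (pre ++ [' ']) ++ r := by simp
        rw [h1, h2, ih (pre ++ [' '])]
        simp
        omega
      · rw [dif_neg]
        · simp [hc]
        · intro h
          have h2 := h.2
          rw [PySem.List.pyGet?_append_length pre r c] at h2
          exact hc (by simpa using h2)

-- past the end of the string every iteration is a no-op
theorem pvStepA_noop : ∀ (m i : Nat) (s : List Char), s.length ≤ i →
    (List.range' i m).foldl pvStepA s = s := by
  intro m
  induction m with
  | zero => intro i s _; simp
  | succ m ih =>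
      intro i s h
      rw [List.range'_succ, List.foldl_cons]
      have hs : pvStepA s i = s := by
        unfold pvStepA
        rw [pvScan, dif_neg (by intro hcon; omega)]
        simp
      rw [hs]
      exact ih (i + 1) s (by omega)

-- the main invariant of A's index loop
theorem pvStepA_main : ∀ (m : Nat) (pre rest : List Char), rest.length ≤ m →
    (List.range' pre.length m).foldl pvStepA (pre ++ rest) = pre ++ pvSqueeze rest := by
  intro m
  induction m with
  | zero =>
      intro pre rest h
      have : rest = [] := List.length_eq_zero_iff.mp (by omega)
      subst this; simp [pvSqueeze]
  | succ m ih =>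
      intro pre rest h
      match rest with
      | [] =>
          rw [pvStepA_noop (m + 1) pre.length (pre ++ []) (by simp)]
          simp [pvSqueeze]
      | c :: r =>
          rw [List.range'_succ, List.foldl_cons]
          by_cases hc : c = ' '
          · subst hc
            set k := (r.takeWhile (· = ' ')).length with hk
            have hstep : pvStepA (pre ++ ' ' :: r) pre.length
                = (pre ++ [' ']) ++ r.dropWhile (· = ' ') := by
              unfold pvStepA
              rw [pvScan_append]
              have hlt : pre.length < pre.length + (((' ' :: r).takeWhile (· = ' ')).length) := by
                simp
              rw [if_pos hlt]
              have htw : ((' ' :: r).takeWhile (· = ' ')).length = k + 1 := by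
                simp [hk]
              rw [htw]
              have h0 : PySem.List.slice (pre ++ ' ' :: r) (some 0) (some (pre.length : Int)) = pre := by
                rw [PySem.List.slice_zero_start, PySem.List.slice_to_natCast]
                simp
              have h2 : PySem.List.slice (pre ++ ' ' :: r) (some ((pre.length + (k + 1) : Nat) : Int)) none
                  = r.dropWhile (· = ' ') := by
                rw [PySem.List.slice_from_natCast]
                have : pre.length + (k + 1) = pre.length + 1 + k := by omega
                rw [this]
                have hd : List.drop (pre.length + 1 + k) (pre ++ ' ' :: r) = List.drop k r := by
                  have hl : pre.length + 1 + k = (pre ++ [' ']).length + k := by simp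
                  have hs : pre ++ ' ' :: r = (pre ++ [' ']) ++ r := by simp
                  have hnil : List.drop ((pre ++ [' ']).length + k) (pre ++ [' ']) = [] :=
                    List.drop_eq_nil_of_le (by omega)
                  rw [hl, hs, List.drop_append, hnil]
                  simp
                rw [hd]
                conv_lhs => rw [← List.takeWhile_append_dropWhile (p := (· = ' ')) (l := r)]
                rw [hk, List.drop_left]
              rw [h0, h2]
            rw [hstep]
            have hlen : pre.length + 1 = (pre ++ [' ']).length := by simp
            rw [hlen, ih (pre ++ [' ']) (r.dropWhile (· = ' '))
              (by have := List.length_dropWhile_le (· = ' ') r; simp at h ⊢; omega)]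
            show pre ++ [' '] ++ pvSqueeze (r.dropWhile (· = ' ')) = pre ++ pvSqueeze (' ' :: r)
            rw [pvSqueeze]
            simp
          · have hstep : pvStepA (pre ++ c :: r) pre.length = pre ++ c :: r := by
              unfold pvStepA
              rw [pvScan_append]
              have : ((c :: r).takeWhile (· = ' ')).length = 0 := by
                simp [hc]
              rw [this]
              simp
            rw [hstep]
            have h1 : pre.length + 1 = (pre ++ [c]).length := by simp
            have h2 : pre ++ c :: r = (pre ++ [c]) ++ r := by simp
            rw [h1, h2, ih (pre ++ [c]) r (by simp at h; omega)]
            rw [pvSqueeze, if_neg hc]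
            simp
-- B's fold appends the flagged collapse of the remaining characters
theorem pvStep2_fold : ∀ (ds acc : List Char),
    ds.foldl pvStep2 acc = acc ++ pvCol (acc.getLast? == some ' ') ds := by
  intro ds
  induction ds with
  | nil => intro acc; simp [pvCol]
  | cons c r ih =>
      intro acc
      rw [List.foldl_cons]
      by_cases hc : c = ' '
      · subst hc
        by_cases hl : acc.getLast? = some ' '
        · have : pvStep2 acc ' ' = acc := by unfold pvStep2; rw [if_pos ⟨rfl, hl⟩]
          rw [this, ih acc]
          simp [pvCol, hl]
        · have : pvStep2 acc ' ' = acc ++ [' '] := by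
            unfold pvStep2; rw [if_neg (by intro hcon; exact hl hcon.2)]
          rw [this, ih (acc ++ [' '])]
          have hlast : (acc ++ [' ']).getLast? = some ' ' := by simp
          rw [hlast]
          simp [pvCol, hl]
      · have : pvStep2 acc c = acc ++ [c] := by
          unfold pvStep2; rw [if_neg (by intro hcon; exact hc hcon.1)]
        rw [this, ih (acc ++ [c])]
        have hlast : (acc ++ [c]).getLast? = some c := by simp
        rw [hlast]
        have : (some c == some ' ') = false := by simpa using hc
        rw [this]
        simp [pvCol, hc]

theorem pvCol_eq_squeeze : ∀ (ds : List Char) (b : Bool),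
    pvCol b ds = if b then pvSqueeze (ds.dropWhile (· = ' ')) else pvSqueeze ds := by
  intro ds
  induction ds with
  | nil => intro b; cases b <;> simp [pvCol, pvSqueeze]
  | cons c r ih =>
      intro b
      by_cases hc : c = ' '
      · subst hc
        have h1 : pvCol true (' ' :: r) = pvCol true r := by simp [pvCol]
        have h2 : pvCol false (' ' :: r) = ' ' :: pvCol true r := by simp [pvCol]
        cases b
        · rw [h2, ih true]
          simp only [if_pos trivial]
          rw [if_neg (by simp)]
          rw [pvSqueeze]
          simp
        · rw [h1, ih true]
          simp
      · have h1 : ∀ b', pvCol b' (c :: r) = c :: pvCol false r := by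
          intro b'; simp [pvCol, hc]
        have h2 : pvSqueeze (c :: r) = c :: pvSqueeze r := by rw [pvSqueeze, if_neg hc]
        have h3 : (c :: r).dropWhile (· = ' ') = c :: r := by simp [hc]
        cases b <;> simp [h1, h2, h3, ih false]

-- pvStepB is pvStep2 after the per-character replacement
theorem pvStepB_eq : pvStepB = fun acc ch => pvStep2 acc (pvRepl ch) := by
  funext acc ch
  unfold pvStepB pvStep2 pvRepl
  rfl

theorem pvSpaceNotPunct : ' ' ∉ pvPunct := by decide

-- ===== VERDICT (by name: the statement is the Claim_ definition above) =====
theorem getRidOfPunctuation_spec : Claim_equal_getRidOfPunctuation := by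
  intro text _
  unfold Spec_getRidOfPunctuation getRidOfPunctuation getRidOfPunctuation_alt
  set t0 := PySem.Chars.lower text.toList with ht0
  have hrep : pvPunct.foldl (fun t p => PySem.Chars.replace t [p] [' ']) t0
      = t0.map pvRepl := by
    rw [pvFoldReplace pvPunct pvSpaceNotPunct t0]
    rfl
  simp only [hrep]
  -- A's side: the index loop squeezes
  have hA : (List.range (t0.map pvRepl).length).foldl pvStepA (t0.map pvRepl)
      = pvSqueeze (t0.map pvRepl) := by
    have := pvStepA_main (t0.map pvRepl).length [] (t0.map pvRepl) (le_refl _)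
    simpa [List.range_eq_range'] using this
  -- B's side: the single pass squeezes too
  have hB : t0.foldl pvStepB [] = pvSqueeze (t0.map pvRepl) := by
    rw [pvStepB_eq, ← List.foldl_map, pvStep2_fold (t0.map pvRepl) []]
    simp [pvCol_eq_squeeze]
  rw [hA, hB]
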